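-- pv_equiv track=rewrite | github.com/elyahul/Ansible | filter_plugins/FilterModule.py | cfg_to_erase
-- ===== SOURCE A (Python) =====
-- def cfg_to_erase(data):       # Collects names of policy-maps and class-maps from the output
--     qos_list = []
--     class_map_list = []
--     global_qos_list = [qos_list, class_map_list]
--     _data = []
--     for line in data:
--         _data.append(line.strip())
--     for _line in _data:
--         if _line == '':
--             _data.remove(_line)
--     for _line in _data:
--         if "output" in _line:
--             qos_list.append(_line.split()[2])
--         elif ("Service-policy" in _line) and ("output" not in _line):
--             qos_list.append(_line.split()[2])
--         elif (_line.startswith("Class-map")) and ("class-default" not in _line):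
--             class_map_list.append(_line.split()[1])
--     return global_qos_list
-- ===== SOURCE B (Python) =====
-- def cfg_to_erase(data):
--     # One pass: strip and classify each line inline; empty lines match no branch,
--     # and "output" lines / "Service-policy"-without-"output" lines both take token [2].
--     qos_list = []
--     class_map_list = []
--     for line in data:
--         s = line.strip()
--         if "output" in s or "Service-policy" in s:
--             qos_list.append(s.split()[2])
--         elif s.startswith("Class-map") and "class-default" not in s:
--             class_map_list.append(s.split()[1])
--     return [qos_list, class_map_list]
-- ===== Notes on version B (the rewrite author's own statement) =====
-- stated objective: simpler
-- what changed: B fuses A's three sequential passes (strip-list build, quadratic in-place empty-line removal, classify) into one loop over the input that strips and classifies inline, merging the first two branches into a single 'output or Service-policy' test since both append token [2]; the empty-line removal pass disappears because empty lines match no branch.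
import Mathlib
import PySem

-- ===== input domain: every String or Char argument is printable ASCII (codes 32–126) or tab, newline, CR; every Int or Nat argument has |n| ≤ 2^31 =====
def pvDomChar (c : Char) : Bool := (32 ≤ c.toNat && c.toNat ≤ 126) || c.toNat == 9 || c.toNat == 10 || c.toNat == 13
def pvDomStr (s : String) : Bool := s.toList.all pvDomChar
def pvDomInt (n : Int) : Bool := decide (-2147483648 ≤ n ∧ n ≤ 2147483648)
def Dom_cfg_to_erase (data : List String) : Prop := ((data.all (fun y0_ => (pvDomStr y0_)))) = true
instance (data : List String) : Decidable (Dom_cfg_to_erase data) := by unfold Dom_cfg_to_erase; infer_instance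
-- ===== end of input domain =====

-- B fuses A's three passes (strip-list build, in-place empty-line removal, classify) into one loop; same return value.

-- ===== PORT A =====
-- Python's `for _line in _data: if _line == '': _data.remove(_line)` iterates by index over the list
-- it mutates; ported step for step as CPython executes it: at position i, if the element is '', remove
-- the first occurrence of '' (List.erase) and advance the index — exact, hand-ported.
def removeLoopA (l : List String) (i : Nat) : List String :=
  if h : i < l.length then
    if l[i] = "" then removeLoopA (l.erase "") (i + 1)
    else removeLoopA l (i + 1)
  else l
termination_by l.length - i
decreasing_by
  · have : (l.erase "").length ≤ l.length := List.length_erase_le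
    omega
  · omega

-- the body of A's third loop, one iteration (branches in A's order; split()[k] via pyGet?, the none case excluded by Pre_)
def stepA (st : List String × List String) (s : String) : List String × List String :=
  if PySem.Str.isIn "output" s then
    (st.1 ++ [((PySem.List.pyGet? (PySem.Str.split₀ s) 2).getD "")], st.2)
  else if PySem.Str.isIn "Service-policy" s && !(PySem.Str.isIn "output" s) then
    (st.1 ++ [((PySem.List.pyGet? (PySem.Str.split₀ s) 2).getD "")], st.2)
  else if PySem.Str.startswith s "Class-map" && !(PySem.Str.isIn "class-default" s) then
    (st.1, st.2 ++ [((PySem.List.pyGet? (PySem.Str.split₀ s) 1).getD "")])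
  else st

def cfg_to_erase (data : List String) : List (List String) :=
  let _data := data.foldl (fun acc line => acc ++ [PySem.Str.strip line]) []
  let _data2 := removeLoopA _data 0
  let st := _data2.foldl stepA ([], [])
  [st.1, st.2]

-- ===== PORT B =====
-- one fused pass: strip inline, first two branches merged
def stepB (st : List String × List String) (line : String) : List String × List String :=
  let s := PySem.Str.strip line
  if PySem.Str.isIn "output" s || PySem.Str.isIn "Service-policy" s then
    (st.1 ++ [((PySem.List.pyGet? (PySem.Str.split₀ s) 2).getD "")], st.2)
  else if PySem.Str.startswith s "Class-map" && !(PySem.Str.isIn "class-default" s) then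
    (st.1, st.2 ++ [((PySem.List.pyGet? (PySem.Str.split₀ s) 1).getD "")])
  else st

def cfg_to_erase_alt (data : List String) : List (List String) :=
  let st := data.foldl stepB ([], [])
  [st.1, st.2]

-- ===== PRECONDITION & SPEC =====
-- Pre_ excludes exactly the inputs on which Python A raises IndexError: a line matching a branch
-- whose whitespace-split has too few tokens (B raises the same IndexError there).
def Pre_cfg_to_erase (data : List String) : Prop :=
  ∀ line ∈ data,
    ((PySem.Str.isIn "output" (PySem.Str.strip line) = true ∨
      PySem.Str.isIn "Service-policy" (PySem.Str.strip line) = true) →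
      3 ≤ (PySem.Str.split₀ (PySem.Str.strip line)).length) ∧
    ((PySem.Str.isIn "output" (PySem.Str.strip line) = false ∧
      PySem.Str.isIn "Service-policy" (PySem.Str.strip line) = false ∧
      PySem.Str.startswith (PySem.Str.strip line) "Class-map" = true ∧
      PySem.Str.isIn "class-default" (PySem.Str.strip line) = false) →
      2 ≤ (PySem.Str.split₀ (PySem.Str.strip line)).length)
instance (data : List String) : Decidable (Pre_cfg_to_erase data) := by
  unfold Pre_cfg_to_erase; infer_instance

def pvWitness_cfg_to_erase : List String :=
  ["  Service-policy output PM2", "Class-map match-all VOICE", "", "interface Gi0/1"]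

def Spec_cfg_to_erase (data : List String) (out : List (List String)) : Prop := out = cfg_to_erase_alt data
instance (data : List String) (out : List (List String)) : Decidable (Spec_cfg_to_erase data out) := by unfold Spec_cfg_to_erase; infer_instance

-- ===== CLAIM (what is proved, stated in full; the proofs are below) =====
def Claim_equal_cfg_to_erase : Prop := ∀ (data : List String), Dom_cfg_to_erase data → Pre_cfg_to_erase data → Spec_cfg_to_erase data (cfg_to_erase data)

-- ===== LEMMAS AND PROOFS =====

-- an empty (stripped) line matches no branch of A's classifier
theorem stepA_empty (st : List String × List String) : stepA st "" = st := by
  have h1 : PySem.Str.isIn "output" "" = false := by decide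
  have h2 : PySem.Str.isIn "Service-policy" "" = false := by decide
  have h3 : PySem.Str.startswith "" "Class-map" = false := by decide
  unfold stepA
  rw [h1, h2, h3]
  simp

-- classification ignores empty strings: fold over l = fold over l with the ""s dropped
theorem foldl_stepA_filter (l : List String) (st : List String × List String) :
    l.foldl stepA st = (l.filter (· ≠ "")).foldl stepA st := by
  induction l generalizing st with
  | nil => rfl
  | cons x xs ih =>
    by_cases hx : x = ""
    · subst hx
      rw [List.foldl_cons, stepA_empty, ih]
      simp
    · rw [List.foldl_cons, ih]
      have hcons : List.filter (· ≠ "") (x :: xs) = x :: List.filter (· ≠ "") xs := by simp [hx]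
      rw [hcons, List.foldl_cons]

-- erasing one "" does not change the non-"" elements
theorem filter_erase_empty (l : List String) :
    (l.erase "").filter (· ≠ "") = l.filter (· ≠ "") := by
  induction l with
  | nil => rfl
  | cons x xs ih =>
    by_cases hx : x = ""
    · subst hx; simp
    · rw [List.erase_cons, if_neg (by simp [hx])]
      simp only [List.filter_cons, ih]

-- A's removal pass only deletes "" elements
theorem filter_removeLoopA (l : List String) (i : Nat) :
    (removeLoopA l i).filter (· ≠ "") = l.filter (· ≠ "") := by
  induction l, i using removeLoopA.induct with
  | case1 l i h hx ih =>
    rw [removeLoopA]; simp only [h, dite_true, hx, if_true]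
    rw [ih, filter_erase_empty]
  | case2 l i h hx ih =>
    rw [removeLoopA]; simp only [h, dite_true, hx, if_false]
    exact ih
  | case3 l i h =>
    rw [removeLoopA]; simp [h]

-- one B step is one A step on the stripped line (the merged test covers A's first two branches)
theorem stepB_eq_stepA (st : List String × List String) (line : String) :
    stepB st line = stepA st (PySem.Str.strip line) := by
  unfold stepB stepA
  cases ho : PySem.Str.isIn "output" (PySem.Str.strip line) <;>
    cases hsp : PySem.Str.isIn "Service-policy" (PySem.Str.strip line) <;>
      simp only [ho, hsp, Bool.or_self, Bool.or_true, Bool.true_or, Bool.not_true,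
        Bool.not_false, Bool.and_true, Bool.and_false, if_true, if_false,
        Bool.false_eq_true]

theorem foldl_stepB_eq (data : List String) (st : List String × List String) :
    data.foldl stepB st = (data.map PySem.Str.strip).foldl stepA st := by
  rw [List.foldl_map]
  exact List.foldl_ext _ _ st (fun a b _ => stepB_eq_stepA a b)

-- A's append loop builds the mapped list
theorem foldl_strip_eq_map (data : List String) :
    data.foldl (fun acc line => acc ++ [PySem.Str.strip line]) [] = data.map PySem.Str.strip := by
  simpa using PySem.List.foldl_append_singleton_eq_map PySem.Str.strip data []

-- ===== VERDICT (by name: the statement is the Claim_ definition above) =====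
theorem cfg_to_erase_spec : Claim_equal_cfg_to_erase := by
  intro data _ _
  show cfg_to_erase data = cfg_to_erase_alt data
  unfold cfg_to_erase cfg_to_erase_alt
  dsimp only
  rw [foldl_strip_eq_map, foldl_stepB_eq,
      foldl_stepA_filter (removeLoopA (data.map PySem.Str.strip) 0),
      filter_removeLoopA, ← foldl_stepA_filter]
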